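-- pv_equiv track=rewrite | github.com/uwgraphics/Release-TextDNA | textDNACSVGenerator.py | ngramUpdate
-- ===== SOURCE A (Python) =====
-- from collections import defaultdict
--
-- def ngramUpdate(tokens, documentNgramCounts, corpusNgramCounts):
--     doc_grams = defaultdict(int)
--     for token in tokens:
--         corpusNgramCounts[token] +=1
--         doc_grams[token] += 1
--     for key in doc_grams.keys():
--         documentNgramCounts[key] += 1
--     return doc_grams
-- ===== SOURCE B (Python) =====
-- from collections import defaultdict
--
-- def ngramUpdate(tokens, documentNgramCounts, corpusNgramCounts):
--     doc_grams = defaultdict(int)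
--     for key in dict.fromkeys(tokens):
--         c = tokens.count(key)
--         corpusNgramCounts[key] += c
--         documentNgramCounts[key] += 1
--         doc_grams[key] = c
--     return doc_grams
-- ===== Notes on version B (the rewrite author's own statement) =====
-- stated objective: alternative
-- what changed: A increments counters token by token in one pass; B first dedups the tokens (dict.fromkeys) and loops over the distinct keys only, computing each multiplicity with a tokens.count(key) scan, assigning it once into doc_grams and bulk-adding it to corpusNgramCounts (per-unique-key nested-scan algorithm instead of per-token increments).
-- outside the precondition, e.g. on ngramUpdate(['x'], {}, {}): A raises KeyError, B raises KeyError
import Mathlib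
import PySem

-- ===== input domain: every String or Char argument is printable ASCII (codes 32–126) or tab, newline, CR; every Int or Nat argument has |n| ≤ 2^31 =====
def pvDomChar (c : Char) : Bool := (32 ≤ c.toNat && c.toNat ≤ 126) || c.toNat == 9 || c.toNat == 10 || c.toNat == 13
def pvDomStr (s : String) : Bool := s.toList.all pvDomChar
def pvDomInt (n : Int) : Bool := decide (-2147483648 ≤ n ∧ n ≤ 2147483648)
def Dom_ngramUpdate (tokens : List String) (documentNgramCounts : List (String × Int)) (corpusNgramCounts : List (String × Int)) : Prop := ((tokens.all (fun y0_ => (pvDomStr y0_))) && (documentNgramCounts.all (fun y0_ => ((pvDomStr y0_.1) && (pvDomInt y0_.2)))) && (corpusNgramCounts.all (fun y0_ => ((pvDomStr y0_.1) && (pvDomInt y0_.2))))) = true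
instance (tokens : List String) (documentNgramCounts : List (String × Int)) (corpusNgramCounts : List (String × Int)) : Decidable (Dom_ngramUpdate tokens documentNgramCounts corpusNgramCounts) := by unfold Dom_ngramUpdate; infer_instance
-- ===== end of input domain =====

-- B replaces A's per-token increments by a loop over the DISTINCT tokens only, computing each
-- multiplicity with a tokens.count scan (alternative decomposition). Both A and B mutate
-- documentNgramCounts and corpusNgramCounts in place identically; the equivalence proved here
-- is about the RETURN value only.


-- ===== PORT A =====
-- The two mutated dicts are threaded (under Pre_ every token is already a key, so the
-- plain-dict 'd[k] += 1' equals modify k 0 (·+1)); they do not contribute to the return value.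
def ngramUpdate (tokens : List String) (documentNgramCounts : List (String × Int)) (corpusNgramCounts : List (String × Int)) : List (String × Int) :=
  let st := tokens.foldl
    (fun (st : PySem.Dict String Int × PySem.Dict String Int) token =>
      ((st.1).modify token 0 (· + 1), (st.2).modify token 0 (· + 1)))
    (PySem.Dict.ofList corpusNgramCounts, PySem.Dict.empty)
  let doc_grams := st.2
  let _docN := doc_grams.keys.foldl
    (fun (d : PySem.Dict String Int) key => d.modify key 0 (· + 1))
    (PySem.Dict.ofList documentNgramCounts)
  doc_grams.items

-- ===== PORT B =====
-- One loop over dict.fromkeys(tokens) (= PySem.List.dedup); the body updates the two mutated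
-- dicts and assigns tokens.count(key) into doc_grams once per key.
def ngramUpdate_alt (tokens : List String) (documentNgramCounts : List (String × Int)) (corpusNgramCounts : List (String × Int)) : List (String × Int) :=
  let st := (PySem.List.dedup tokens).foldl
    (fun (st : PySem.Dict String Int × PySem.Dict String Int × PySem.Dict String Int) key =>
      let c : Int := tokens.count key
      ((st.1).modify key 0 (· + c), (st.2.1).modify key 0 (· + 1), (st.2.2).insert key c))
    (PySem.Dict.ofList corpusNgramCounts, PySem.Dict.ofList documentNgramCounts, PySem.Dict.empty)
  st.2.2.items

-- ===== PRECONDITION & SPEC =====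
-- Pre_ excludes exactly the inputs where the Python A raises KeyError: a token missing
-- from corpusNgramCounts or documentNgramCounts (plain-dict 'd[k] += 1'); B raises there too.
def Pre_ngramUpdate (tokens : List String) (documentNgramCounts : List (String × Int)) (corpusNgramCounts : List (String × Int)) : Prop :=
  ∀ t ∈ tokens, t ∈ corpusNgramCounts.map Prod.fst ∧ t ∈ documentNgramCounts.map Prod.fst
instance (tokens : List String) (documentNgramCounts : List (String × Int)) (corpusNgramCounts : List (String × Int)) : Decidable (Pre_ngramUpdate tokens documentNgramCounts corpusNgramCounts) := by unfold Pre_ngramUpdate; infer_instance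

def pvWitness_ngramUpdate : List String × (List (String × Int)) × (List (String × Int)) :=
  (["a", "b", "a"], [("a", 0), ("b", 1)], [("a", 2), ("b", 0)])

def Spec_ngramUpdate (tokens : List String) (documentNgramCounts : List (String × Int)) (corpusNgramCounts : List (String × Int)) (out : List (String × Int)) : Prop := out = ngramUpdate_alt tokens documentNgramCounts corpusNgramCounts
instance (tokens : List String) (documentNgramCounts : List (String × Int)) (corpusNgramCounts : List (String × Int)) (out : List (String × Int)) : Decidable (Spec_ngramUpdate tokens documentNgramCounts corpusNgramCounts out) := by unfold Spec_ngramUpdate; infer_instance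

-- ===== CLAIM =====
def Claim_equal_ngramUpdate : Prop := ∀ (tokens : List String) (documentNgramCounts : List (String × Int)) (corpusNgramCounts : List (String × Int)), Dom_ngramUpdate tokens documentNgramCounts corpusNgramCounts → Pre_ngramUpdate tokens documentNgramCounts corpusNgramCounts → Spec_ngramUpdate tokens documentNgramCounts corpusNgramCounts (ngramUpdate tokens documentNgramCounts corpusNgramCounts)

-- ===== LEMMAS AND PROOFS =====

-- A's returned items: doc_grams is Counter(tokens), whose items are the distinct tokens with their counts.
theorem ngramUpdate_items (tokens : List String) (documentNgramCounts : List (String × Int)) (corpusNgramCounts : List (String × Int)) :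
    ngramUpdate tokens documentNgramCounts corpusNgramCounts
      = (PySem.Set.ofList tokens).map (fun k => (k, (tokens.count k : Int))) := by
  unfold ngramUpdate
  rw [PySem.List.foldl_prod_mk
    (f := fun (d : PySem.Dict String Int) (t : String) => d.modify t 0 (· + 1))
    (g := fun (d : PySem.Dict String Int) (t : String) => d.modify t 0 (· + 1))]
  exact PySem.Dict.items_counter tokens

-- B's returned items: the third accumulator is a fold of fresh inserts over the deduped tokens.
theorem ngramUpdate_alt_items (tokens : List String) (documentNgramCounts : List (String × Int)) (corpusNgramCounts : List (String × Int)) :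
    ngramUpdate_alt tokens documentNgramCounts corpusNgramCounts
      = (PySem.Set.ofList tokens).map (fun k => (k, (tokens.count k : Int))) := by
  unfold ngramUpdate_alt
  rw [PySem.List.foldl_prod_mk
    (f := fun (d : PySem.Dict String Int) (key : String) => d.modify key 0 (· + (tokens.count key : Int)))
    (g := fun (p : PySem.Dict String Int × PySem.Dict String Int) (key : String) =>
      ((p.1).modify key 0 (· + 1), (p.2).insert key (tokens.count key : Int)))]
  rw [PySem.List.foldl_prod_mk
    (f := fun (d : PySem.Dict String Int) (key : String) => d.modify key 0 (· + 1))
    (g := fun (d : PySem.Dict String Int) (key : String) => d.insert key (tokens.count key : Int))]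
  simp only []
  have h := PySem.Dict.items_foldl_insert_fresh (l := PySem.List.dedup tokens)
        (k := fun key => key) (v := fun key => (tokens.count key : Int))
        (d := PySem.Dict.empty)
        (by intro a _; exact PySem.Dict.contains_empty a)
        (by simp)
  simp only [] at h
  rw [h]
  simp [PySem.List.dedup_eq_ofList, PySem.Dict.empty]

-- ===== VERDICT =====
theorem ngramUpdate_spec : Claim_equal_ngramUpdate := by
  intro tokens docN corpN _ _
  unfold Spec_ngramUpdate
  rw [ngramUpdate_items, ngramUpdate_alt_items]
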